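-- pv_equiv track=rewrite | github.com/bennett-nguyen/Funkin-Pi | source/comp/json/load.py | _process_info_diff
-- ===== SOURCE A (Python) =====
-- import itertools
--
-- def _process_info_diff(array):
--     lower_case_text = [
--         difficulty.lower() for difficulty in array
--     ]
--
--     remove_junk = [
--         difficulty for difficulty in list(set(lower_case_text)) if difficulty in ["easy", "normal", "hard"]
--     ]
--
--     return [
--         string for order, string in itertools.product(("e", "n", "h"), remove_junk) if string[0] == order
--     ]
-- ===== SOURCE B (Python) =====
-- def _process_info_diff(array):
--     present = {difficulty.lower() for difficulty in array}
--     return [name for name in ("easy", "normal", "hard") if name in present]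
-- ===== Notes on version B (the rewrite author's own statement) =====
-- stated objective: simpler
-- what changed: B builds a set of the lowercased inputs once and emits each of the three canonical difficulty names, in their fixed order, that is present in it, replacing A's dedup-then-itertools.product first-letter matching scan.
import Mathlib
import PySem

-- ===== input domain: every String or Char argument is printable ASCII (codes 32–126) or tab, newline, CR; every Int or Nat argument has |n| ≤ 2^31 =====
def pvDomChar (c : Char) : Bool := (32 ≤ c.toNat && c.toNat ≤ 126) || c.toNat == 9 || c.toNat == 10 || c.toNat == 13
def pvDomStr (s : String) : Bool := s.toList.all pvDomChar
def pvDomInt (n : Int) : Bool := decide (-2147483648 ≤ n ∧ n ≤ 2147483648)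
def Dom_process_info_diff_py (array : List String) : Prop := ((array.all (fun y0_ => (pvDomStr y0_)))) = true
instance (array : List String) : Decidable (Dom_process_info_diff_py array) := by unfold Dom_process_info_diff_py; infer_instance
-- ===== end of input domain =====

-- B drives the loop from the fixed canonical difficulty names with a membership test in the
-- set of lowercased inputs, instead of A's dedup-then-itertools.product first-letter scan (objective: simpler).
-- A iterates over a Python set in list(set(...)); its final result does not depend on that hash order
-- (each kept name occurs once and product reorders by first letter), so the port uses Set.ofList order.

-- ===== PORT A =====
def process_info_diff_py (array : List String) : List String :=
  let lower_case_text := array.map PySem.Str.lower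
  let remove_junk := (PySem.Set.ofList lower_case_text).filter
    (fun d => d == "easy" || d == "normal" || d == "hard")   -- d in ["easy","normal","hard"]
  -- itertools.product(("e","n","h"), remove_junk), keeping string when string[0] == order;
  -- Python's one-character order tags "e","n","h" are ported as Chars compared with string[0]
  (['e', 'n', 'h'].flatMap (fun order => remove_junk.map (fun s => (order, s)))).filterMap
    (fun p => if PySem.Str.pyGet? p.2 0 == some p.1 then some p.2 else none)

-- ===== PORT B =====
def process_info_diff_py_alt (array : List String) : List String :=
  let present := PySem.Set.ofList (array.map PySem.Str.lower)
  ["easy", "normal", "hard"].filter (fun name => present.contains name)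

-- ===== PRECONDITION & SPEC =====
def Spec_process_info_diff_py (array : List String) (out : List String) : Prop := out = process_info_diff_py_alt array
instance (array : List String) (out : List String) : Decidable (Spec_process_info_diff_py array out) := by unfold Spec_process_info_diff_py; infer_instance

-- ===== CLAIM (what is proved, stated in full; the proofs are below) =====
def Claim_equal_process_info_diff_py : Prop := ∀ (array : List String), Dom_process_info_diff_py array → Spec_process_info_diff_py array (process_info_diff_py array)

-- ===== LEMMAS AND PROOFS =====

-- a nodup list filtered to the occurrences of a single value is that value's membership singleton
lemma filter_eq_singleton_of_nodup (l : List String) (hnd : l.Nodup) (a : String) :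
    l.filter (fun s => s == a) = if a ∈ l then [a] else [] := by
  induction l with
  | nil => simp
  | cons x xs ih =>
    rw [List.nodup_cons] at hnd
    rw [List.filter_cons]
    by_cases hx : x = a
    · subst hx
      simp [ih hnd.2, hnd.1]
    · simp [hx, ih hnd.2, List.mem_cons, Ne.symm hx]

-- one letter-block of A's product loop equals the singleton of the matching canonical name
lemma block_eq (rj : List String)
    (hsub : ∀ s ∈ rj, s = "easy" ∨ s = "normal" ∨ s = "hard")
    (hnd : rj.Nodup) (c : Char) (a : String)
    (hc : ∀ s, (s = "easy" ∨ s = "normal" ∨ s = "hard") →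
        ((PySem.Str.pyGet? s 0 == some c) = true ↔ s = a)) :
    rj.filterMap (fun s => if PySem.Str.pyGet? s 0 == some c then some s else none)
      = if a ∈ rj then [a] else [] := by
  rw [← filter_eq_singleton_of_nodup rj hnd a]
  induction rj with
  | nil => simp
  | cons x xs ih =>
    have hx := hc x (hsub x List.mem_cons_self)
    have ih' := ih (fun s hs => hsub s (List.mem_cons_of_mem x hs)) hnd.of_cons
    by_cases h : x = a
    · subst h
      have hbb : (PySem.Str.pyGet? x 0 == some c) = true := hx.mpr rfl
      rw [List.filterMap_cons, hbb, if_pos rfl, List.filter_cons,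
        if_pos (by simp : ((x == x) = true))]
      exact congrArg (x :: ·) ih'
    · have hbb : (PySem.Str.pyGet? x 0 == some c) = false :=
        Bool.eq_false_iff.mpr (fun hb' => h (hx.mp hb'))
      rw [List.filterMap_cons, hbb, if_neg (by simp), List.filter_cons,
        if_neg (by simp [h])]
      exact ih'

theorem process_info_diff_py_spec : Claim_equal_process_info_diff_py := by
  intro array _
  unfold Spec_process_info_diff_py process_info_diff_py process_info_diff_py_alt
  set lc := array.map PySem.Str.lower with hlc
  set S := PySem.Set.ofList lc with hS
  set rj := S.filter (fun d => d == "easy" || d == "normal" || d == "hard") with hrj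
  have hnd : rj.Nodup := (PySem.Set.nodup_ofList lc).filter _
  have hsub : ∀ s ∈ rj, s = "easy" ∨ s = "normal" ∨ s = "hard" := by
    intro s hs
    have := (List.mem_filter.mp hs).2
    simp only [Bool.or_eq_true, beq_iff_eq] at this
    tauto
  have hmem : ∀ a : String, (a = "easy" ∨ a = "normal" ∨ a = "hard") →
      (a ∈ rj ↔ PySem.Set.contains S a = true) := by
    intro a ha
    rw [hrj, List.mem_filter]
    constructor
    · intro h; simpa [PySem.Set.contains] using h.1
    · intro h
      refine ⟨by simpa [PySem.Set.contains] using h, ?_⟩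
      rcases ha with h | h | h <;> simp [h]
  have he := block_eq rj hsub hnd 'e' "easy" (by rintro s (rfl | rfl | rfl) <;> decide)
  have hn := block_eq rj hsub hnd 'n' "normal" (by rintro s (rfl | rfl | rfl) <;> decide)
  have hh := block_eq rj hsub hnd 'h' "hard" (by rintro s (rfl | rfl | rfl) <;> decide)
  simp only [List.flatMap_cons, List.flatMap_nil, List.append_nil, List.filterMap_append,
    List.filterMap_map, Function.comp]
  rw [he, hn, hh]
  simp only [List.filter_cons, List.filter_nil, hmem "easy" (Or.inl rfl),
    hmem "normal" (Or.inr (Or.inl rfl)), hmem "hard" (Or.inr (Or.inr rfl))]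
  split_ifs <;> simp
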